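-- pv_equiv track=rewrite | github.com/scientiz/Calculus-I-Buddy | Calculus_Buddy.py | _is_number_token
-- ===== SOURCE A (Python) =====
-- def _is_number_token(tok):
--     if tok is None or len(tok) == 0:
--         return False
--     if tok == ".":
--         return False
--
--     dot = 0
--     i = 0
--     while i < len(tok):
--         c = tok[i]
--         o = ord(c)
--         if c == ".":
--             dot += 1
--             if dot > 1:
--                 return False
--         elif not (48 <= o <= 57):
--             return False
--         i += 1
--     return True
-- ===== SOURCE B (Python) =====
-- def _is_number_token(tok):
--     if not tok or tok == ".":
--         return False
--     head, _, tail = tok.partition(".")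
--     return "." not in tail and all("0" <= c <= "9" for c in head + tail)
-- ===== Notes on version B (the rewrite author's own statement) =====
-- stated objective: simpler
-- what changed: A's indexed scan with a mutable dot counter and early returns is replaced by a partition strategy: split the token at the first dot, require the remainder to be dot-free, and digit-check the concatenated halves.
import Mathlib
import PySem

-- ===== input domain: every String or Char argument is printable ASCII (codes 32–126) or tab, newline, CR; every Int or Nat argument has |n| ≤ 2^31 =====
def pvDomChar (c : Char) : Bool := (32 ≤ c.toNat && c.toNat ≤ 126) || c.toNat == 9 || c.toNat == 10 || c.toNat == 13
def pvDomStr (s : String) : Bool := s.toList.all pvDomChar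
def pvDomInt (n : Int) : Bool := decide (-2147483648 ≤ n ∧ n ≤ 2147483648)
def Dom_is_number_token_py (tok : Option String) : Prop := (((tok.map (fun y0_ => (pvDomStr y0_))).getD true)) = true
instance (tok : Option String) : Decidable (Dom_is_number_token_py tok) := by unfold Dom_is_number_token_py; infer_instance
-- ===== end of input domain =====

-- B replaces A's indexed scan with a mutable dot counter by a partition around the first dot:
-- split the token there, require the remainder dot-free, digit-check the glued halves (simpler).

-- ===== PORT A =====
-- A's while loop: remaining characters + the running dot counter
def pvALoop : List Char → Int → Bool
  | [], _ => true
  | c :: rest, dot =>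
    let o : Int := c.toNat            -- o = ord(c)
    if c == '.' then
      let dot := dot + 1
      if dot > 1 then false else pvALoop rest dot
    else if !(decide ((48:Int) ≤ o) && decide (o ≤ 57)) then false
    else pvALoop rest dot

def is_number_token_py (tok : Option String) : Bool :=
  match tok with
  | none => false                                   -- tok is None
  | some s =>
    if PySem.Str.len s == 0 then false              -- len(tok) == 0
    else if s == "." then false
    else pvALoop s.toList 0

-- ===== PORT B =====
def is_number_token_py_alt (tok : Option String) : Bool :=
  match tok with
  | none => false                                   -- not tok (None)
  | some s =>
    if s == "" then false                           -- not tok (empty string)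
    else if s == "." then false
    else
      -- head, _, tail = tok.partition("."): hand port of str.partition, exact —
      -- head = chars before the first '.', tail = chars after it (all of s if no '.')
      let l := s.toList
      let head := l.takeWhile (fun c => !(c == '.'))
      let tail := (l.dropWhile (fun c => !(c == '.'))).drop 1
      -- "." not in tail and all("0" <= c <= "9" for c in head + tail)
      !(tail.contains '.')
        && (head ++ tail).all (fun c => decide ('0' ≤ c) && decide (c ≤ '9'))

-- ===== PRECONDITION & SPEC =====
def Spec_is_number_token_py (tok : Option String) (out : Bool) : Prop := out = is_number_token_py_alt tok
instance (tok : Option String) (out : Bool) : Decidable (Spec_is_number_token_py tok out) := by unfold Spec_is_number_token_py; infer_instance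

-- ===== CLAIM (what is proved, stated in full; the proofs are below) =====
def Claim_equal_is_number_token_py : Prop := ∀ (tok : Option String), Dom_is_number_token_py tok → Spec_is_number_token_py tok (is_number_token_py tok)

-- ===== LEMMAS AND PROOFS =====

-- A's ord-48..57 test coincides with B's character-range comparison
theorem pv_digit_bridge (c : Char) :
    (decide ((48:Int) ≤ (c.toNat : Int)) && decide (((c.toNat : Int)) ≤ 57))
      = (decide ('0' ≤ c) && decide (c ≤ '9')) := by
  have h0 : ('0' ≤ c) ↔ 48 ≤ c.toNat := Iff.rfl
  have h9 : (c ≤ '9') ↔ c.toNat ≤ 57 := Iff.rfl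
  by_cases h1 : (48:Nat) ≤ c.toNat <;> by_cases h2 : c.toNat ≤ 57 <;>
    simp [h0, h9, h1, h2]

-- A's scan accepts iff the total dot count stays ≤ 1 and every char is a dot or an ASCII digit
theorem pvALoop_eq (l : List Char) : ∀ (dot : Int), 0 ≤ dot → dot ≤ 1 →
    pvALoop l dot
      = (decide (dot + (l.count '.' : Int) ≤ 1)
          && l.all (fun c => c == '.' || (decide ('0' ≤ c) && decide (c ≤ '9')))) := by
  induction l with
  | nil =>
    intro dot h0 h1
    simp [pvALoop]
    omega
  | cons c rest ih =>
    intro dot h0 h1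
    by_cases hc : c = '.'
    · subst hc
      by_cases hd : dot + 1 > 1
      · simp [pvALoop, hd]
        intro h
        exfalso
        omega
      · have h1' : dot + 1 ≤ 1 := by omega
        have hiff : (dot + 1 + ((List.count '.' rest : Nat) : Int) ≤ 1)
            ↔ (dot + (((List.count '.' rest : Nat) : Int) + 1) ≤ 1) := by
          omega
        simp [pvALoop, hd, ih (dot + 1) (by omega) h1', hiff]
    · have hcb : (c == '.') = false := by simp [hc]
      by_cases hdig : (decide ((48:Int) ≤ (c.toNat : Int)) && decide (((c.toNat : Int)) ≤ 57)) = true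
      · simp only [Bool.and_eq_true, decide_eq_true_eq] at hdig
        have a48 : 48 ≤ c.toNat := by exact_mod_cast hdig.1
        have b57 : c.toNat ≤ 57 := by exact_mod_cast hdig.2
        have hp : (decide ('0' ≤ c) && decide (c ≤ '9')) = true := by
          rw [← pv_digit_bridge]
          simp
          exact ⟨a48, b57⟩
        simp [pvALoop, hcb, a48, b57, ih dot h0 h1, hc, hp]
      · have hfalse : (decide ('0' ≤ c) && decide (c ≤ '9')) = false := by
          rw [← pv_digit_bridge]
          simpa using hdig
        simp [pvALoop, hcb, hfalse, hc]
        intro ha hb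
        exfalso
        simp only [Bool.and_eq_true, decide_eq_true_eq, not_and, not_le] at hdig
        omega

-- on a dot-free check: "no dot ∧ all digits" coincides with "zero dots ∧ all dot-or-digit"
theorem pv_nodot (l : List Char) :
    ((!decide ('.' ∈ l)) && l.all (fun c => decide ('0' ≤ c) && decide (c ≤ '9')))
      = (decide (l.count '.' = 0)
          && l.all (fun c => c == '.' || (decide ('0' ≤ c) && decide (c ≤ '9')))) := by
  induction l with
  | nil => decide
  | cons c rest ih =>
    by_cases hc : c = '.'
    · subst hc; simp
    · have hc' : ¬('.' = c) := fun h => hc h.symm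
      by_cases hd : (decide ('0' ≤ c) && decide (c ≤ '9')) = true
      · simpa [hc', hc, hd] using ih
      · have hd' := Bool.eq_false_iff.mpr hd
        simp [hc', hc, hd']

-- B's partition check equals the same aggregate condition
theorem pv_B_eq (l : List Char) :
    ((!decide ('.' ∈ (l.dropWhile (fun c => !(c == '.'))).tail))
      && (((l.takeWhile (fun c => !(c == '.'))).all (fun c => decide ('0' ≤ c) && decide (c ≤ '9')))
            && ((l.dropWhile (fun c => !(c == '.'))).tail.all (fun c => decide ('0' ≤ c) && decide (c ≤ '9')))))
      = (decide (l.count '.' ≤ 1)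
          && l.all (fun c => c == '.' || (decide ('0' ≤ c) && decide (c ≤ '9')))) := by
  induction l with
  | nil => decide
  | cons c rest ih =>
    by_cases hc : c = '.'
    · subst hc
      have hcnt : (decide (rest.count '.' + 1 ≤ 1)) = decide (rest.count '.' = 0) := by
        by_cases h : rest.count '.' = 0 <;> simp [h]
      simpa [List.takeWhile_cons, List.dropWhile_cons, List.count_cons, hcnt] using pv_nodot rest
    · have hc' : ¬('.' = c) := fun h => hc h.symm
      by_cases hd : (decide ('0' ≤ c) && decide (c ≤ '9')) = true
      · simpa [List.takeWhile_cons, List.dropWhile_cons, hc, hc', hd] using ih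
      · have hd' := Bool.eq_false_iff.mpr hd
        simp [hc, hd']

theorem pv_main (tok : Option String) : is_number_token_py tok = is_number_token_py_alt tok := by
  cases tok with
  | none => rfl
  | some s =>
    by_cases hs : s = ""
    · subst hs; decide
    · by_cases hdot : s = "."
      · subst hdot; decide
      · have hlen : (PySem.Str.len s == 0) = false := by
          have hne : s.toList ≠ [] := fun h => hs (String.toList_eq_nil_iff.mp h)
          simp [PySem.Str.len]
          exact hs
        have h1 : pvALoop s.toList 0
            = (decide ((0:Int) + (s.toList.count '.' : Int) ≤ 1)
                && s.toList.all (fun c => c == '.' || (decide ('0' ≤ c) && decide (c ≤ '9')))) :=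
          pvALoop_eq s.toList 0 (le_refl 0) (by omega)
        have hcast : (decide ((0:Int) + ((s.toList.count '.' : Nat) : Int) ≤ 1))
            = decide (s.toList.count '.' ≤ 1) := by
          by_cases h : s.toList.count '.' ≤ 1 <;> simp [h]
        have hb1 : (s == ".") = false := by simp [hdot]
        have hb2 : (s == "") = false := by simp [hs]
        rw [hcast] at h1
        simp only [is_number_token_py, is_number_token_py_alt, hlen, hb1, hb2,
          Bool.false_eq_true, if_false]
        rw [h1, ← pv_B_eq]
        simp [List.drop_one]

-- ===== VERDICT (by name: the statement is the Claim_ definition above) =====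
theorem is_number_token_py_spec : Claim_equal_is_number_token_py := by
  intro tok _
  unfold Spec_is_number_token_py
  exact pv_main tok
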